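-- pv_equiv track=rewrite | github.com/SeongHo5356/Algorithm | 백준/Gold/25332. 수들의 합 8/수들의 합 8.py | count_equal_sum_intervals
-- ===== SOURCE A (Python) =====
-- def count_equal_sum_intervals(N, A, B):
--     from collections import defaultdict
--
--     # 차이 배열을 생성
--     C = [A[i] - B[i] for i in range(N)]
--
--     # 누적 합
--     prefix_sum = 0
--     count_map = defaultdict(int)
--
--     # 초기값으로 prefix_sum = 0인 경우를 세어줌
--     count_map[0] = 1
--     result_count = 0
--
--     for value in C:
--         prefix_sum += value
--         # 현재 prefix_sum이 몇 번 등장했는지 더해줌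
--         result_count += count_map[prefix_sum]
--         # 현재 prefix_sum을 count_map에 추가
--         count_map[prefix_sum] += 1
--
--     return result_count
-- ===== SOURCE B (Python) =====
-- def count_equal_sum_intervals(N, A, B):
--     # Same result by direct enumeration of all intervals of the difference
--     # array: for each suffix, count its prefixes summing to zero.
--     C = [A[i] - B[i] for i in range(N)]
--     total = 0
--     while C:
--         s = 0
--         for c in C:
--             s += c
--             if s == 0:
--                 total += 1
--         C = C[1:]
--     return total
-- ===== Notes on version B (the rewrite author's own statement) =====
-- stated objective: alternative
-- what changed: Replaces the prefix-sum + hashmap counting (defaultdict of prefix-sum occurrences) with direct enumeration of all intervals: for every suffix of the difference array a running sum counts the prefixes summing to zero.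
import Mathlib
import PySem

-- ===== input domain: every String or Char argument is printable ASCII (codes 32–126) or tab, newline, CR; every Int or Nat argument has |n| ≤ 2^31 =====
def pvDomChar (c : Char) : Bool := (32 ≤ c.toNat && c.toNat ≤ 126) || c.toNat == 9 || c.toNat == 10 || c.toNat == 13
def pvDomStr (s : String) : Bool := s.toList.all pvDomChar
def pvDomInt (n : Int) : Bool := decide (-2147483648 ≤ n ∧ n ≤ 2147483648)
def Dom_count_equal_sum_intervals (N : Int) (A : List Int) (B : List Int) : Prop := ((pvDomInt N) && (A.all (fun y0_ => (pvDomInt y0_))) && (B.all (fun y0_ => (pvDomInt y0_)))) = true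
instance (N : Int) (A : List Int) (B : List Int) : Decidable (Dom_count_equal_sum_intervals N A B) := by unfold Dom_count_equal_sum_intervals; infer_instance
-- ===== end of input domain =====

-- B replaces A's prefix-sum + hashmap counting with direct enumeration of all
-- intervals of the difference array (alternative algorithm, not faster).

-- ===== PORT A =====
-- C = [A[i] - B[i] for i in range(N)]; none = IndexError (excluded by Pre_)
def pvBuildC (N : Int) (A B : List Int) : Option (List Int) :=
  (PySem.List.pyRange 0 N 1).mapM (fun i => do
    let a ← PySem.List.pyGet? A i
    let b ← PySem.List.pyGet? B i
    pure (a - b))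

-- one iteration of A's loop over C; state = (prefix_sum, count_map, result_count)
def pvStepA (st : Int × PySem.Dict Int Int × Int) (c : Int) : Int × PySem.Dict Int Int × Int :=
  let p := st.1 + c
  let d := st.2.1
  (p, d.insert p (d.getD p 0 + 1), st.2.2 + d.getD p 0)

def count_equal_sum_intervals (N : Int) (A : List Int) (B : List Int) : Int :=
  match pvBuildC N A B with
  | none => 0   -- IndexError in Python; outside Pre_
  | some C => (C.foldl pvStepA (0, (PySem.Dict.empty).insert 0 1, 0)).2.2

-- ===== PORT B =====
-- C = [A[i] - B[i] for i in range(N)] (same comprehension as A's Python)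
def pvBuildC_alt (N : Int) (A B : List Int) : Option (List Int) :=
  (PySem.List.pyRange 0 N 1).mapM (fun i => do
    let a ← PySem.List.pyGet? A i
    let b ← PySem.List.pyGet? B i
    pure (a - b))

-- inner 'for c in C': running sum, count the zeros
def pvInnerB (total : Int) (C : List Int) : Int :=
  (C.foldl (fun (st : Int × Int) c =>
    (st.1 + c, if st.1 + c = 0 then st.2 + 1 else st.2)) (0, total)).2

-- outer 'while C: … ; C = C[1:]'
def pvLoopB : List Int → Int → Int
  | [], total => total
  | c :: C, total => pvLoopB C (pvInnerB total (c :: C))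

def count_equal_sum_intervals_alt (N : Int) (A : List Int) (B : List Int) : Int :=
  match pvBuildC_alt N A B with
  | none => 0
  | some C => pvLoopB C 0

-- ===== PRECONDITION & SPEC =====
-- Pre_ excludes exactly the inputs where A's comprehension raises IndexError: N > len(A) or N > len(B).
def Pre_count_equal_sum_intervals (N : Int) (A : List Int) (B : List Int) : Prop :=
  N ≤ (A.length : Int) ∧ N ≤ (B.length : Int)
instance (N : Int) (A : List Int) (B : List Int) : Decidable (Pre_count_equal_sum_intervals N A B) := by unfold Pre_count_equal_sum_intervals; infer_instance

def pvWitness_count_equal_sum_intervals : Int × List Int × List Int := (2, [1, 2], [2, 1])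

def Spec_count_equal_sum_intervals (N : Int) (A : List Int) (B : List Int) (out : Int) : Prop := out = count_equal_sum_intervals_alt N A B
instance (N : Int) (A : List Int) (B : List Int) (out : Int) : Decidable (Spec_count_equal_sum_intervals N A B out) := by unfold Spec_count_equal_sum_intervals; infer_instance

-- ===== CLAIM (what is proved, stated in full; the proofs are below) =====
def Claim_equal_count_equal_sum_intervals : Prop := ∀ (N : Int) (A : List Int) (B : List Int), Dom_count_equal_sum_intervals N A B → Pre_count_equal_sum_intervals N A B → Spec_count_equal_sum_intervals N A B (count_equal_sum_intervals N A B)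

-- ===== LEMMAS AND PROOFS =====

-- zc t C = number of nonempty prefixes of C summing to t
def pvZc : Int → List Int → Nat
  | _, [] => 0
  | t, c :: C => (if c = t then 1 else 0) + pvZc (t - c) C

-- Y C = zero-sum intervals of C starting strictly after position 0
def pvY : List Int → Nat
  | [] => 0
  | _ :: C => pvZc 0 C + pvY C

-- Z S p C = what A's loop adds to result_count when the multiset of prefix
-- sums seen so far is S and the current prefix sum is p
def pvZ : List Int → Int → List Int → Nat
  | _, _, [] => 0
  | S, p, c :: C => S.count (p + c) + pvZ ((p + c) :: S) (p + c) C

lemma pv_sum_ite_count (S : List Int) (x : Int) :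
    (S.map (fun v => if v = x then (1 : Nat) else 0)).sum = S.count x := by
  induction S with
  | nil => simp
  | cons a S ih =>
    simp [List.count_cons, ih]
    by_cases h : a = x <;> simp [h] <;> omega

lemma pv_sum_map_add (S : List Int) (f g : Int → Nat) :
    (S.map (fun v => f v + g v)).sum = (S.map f).sum + (S.map g).sum := by
  induction S with
  | nil => simp
  | cons a S ih => simp [ih]; omega

lemma pvZ_eq (C : List Int) : ∀ (S : List Int) (p : Int),
    pvZ S p C = (S.map (fun v => pvZc (v - p) C)).sum + pvY C := by
  induction C with
  | nil => intro S p; simp [pvZ, pvZc, pvY]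
  | cons c C ih =>
    intro S p
    have hsplit : (S.map (fun v => pvZc (v - p) (c :: C))).sum
        = (S.map (fun v => if v = p + c then (1 : Nat) else 0)).sum
          + (S.map (fun v => pvZc (v - (p + c)) C)).sum := by
      rw [← pv_sum_map_add]
      apply congrArg List.sum
      apply List.map_congr_left
      intro v _
      show pvZc (v - p) (c :: C) = _
      have h1 : (c = v - p) = (v = p + c) := by
        by_cases h : v = p + c <;> simp [h] <;> omega
      have h2 : v - p - c = v - (p + c) := by ring
      simp [pvZc, h1, h2]
    calc pvZ S p (c :: C)
        = S.count (p + c) + pvZ ((p + c) :: S) (p + c) C := rfl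
      _ = S.count (p + c) + (pvZc 0 C + (S.map (fun v => pvZc (v - (p + c)) C)).sum + pvY C) := by
          rw [ih]; simp
      _ = (S.map (fun v => pvZc (v - p) (c :: C))).sum + pvY (c :: C) := by
          rw [hsplit, pv_sum_ite_count, pvY]; omega

lemma pv_foldA (C : List Int) : ∀ (S : List Int) (p : Int) (d : PySem.Dict Int Int) (r : Int),
    (∀ v, d.getD v 0 = (S.count v : Int)) →
    (C.foldl pvStepA (p, d, r)).2.2 = r + (pvZ S p C : Int) := by
  induction C with
  | nil => intro S p d r _; simp [pvZ]
  | cons c C ih =>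
    intro S p d r hd
    have hd' : ∀ v, (d.insert (p + c) (d.getD (p + c) 0 + 1)).getD v 0
        = (((p + c) :: S).count v : Int) := by
      intro v
      rw [PySem.Dict.getD_insert]
      by_cases h : v = p + c
      · simp [h, hd, List.count_cons]
      · simp [h, hd, List.count_cons, Ne.symm h]
    show (C.foldl pvStepA (p + c, _, r + d.getD (p + c) 0)).2.2 = _
    rw [ih ((p + c) :: S) (p + c) _ _ hd', hd, pvZ]
    push_cast
    ring

lemma pv_innerB (C : List Int) : ∀ (s t : Int),
    (C.foldl (fun (st : Int × Int) c =>
      (st.1 + c, if st.1 + c = 0 then st.2 + 1 else st.2)) (s, t)).2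
    = t + (pvZc (-s) C : Int) := by
  induction C with
  | nil => intro s t; simp [pvZc]
  | cons c C ih =>
    intro s t
    have h1 : (c = -s) = (s + c = 0) := by
      by_cases h : s + c = 0 <;> simp [h] <;> omega
    have h2 : -s - c = -(s + c) := by ring
    show (C.foldl _ (s + c, if s + c = 0 then t + 1 else t)).2 = _
    rw [ih]
    simp only [pvZc, h1, h2]
    by_cases h : s + c = 0 <;> simp [h] <;> push_cast <;> ring

lemma pv_loopB (C : List Int) : ∀ (t : Int),
    pvLoopB C t = t + ((pvZc 0 C : Int) + (pvY C : Int)) := by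
  induction C with
  | nil => intro t; simp [pvLoopB, pvZc, pvY]
  | cons c C ih =>
    intro t
    rw [pvLoopB, ih, pvInnerB, pv_innerB]
    simp only [pvY, neg_zero]
    push_cast
    ring

lemma pv_loops_agree (C : List Int) :
    (C.foldl pvStepA (0, (PySem.Dict.empty).insert 0 1, 0)).2.2 = pvLoopB C 0 := by
  have hd : ∀ v : Int, ((PySem.Dict.empty (ν := Int)).insert 0 1).getD v 0
      = (([(0 : Int)].count v : Int)) := by
    intro v
    rw [PySem.Dict.getD_insert]
    by_cases h : v = 0
    · simp [h, PySem.Dict.getD_empty]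
    · simp [h, PySem.Dict.getD_empty, List.count_singleton, Ne.symm h]
  rw [pv_foldA C [0] 0 _ 0 hd, pv_loopB, pvZ_eq]
  simp

-- ===== VERDICT (by name: the statement is the Claim_ definition above) =====
theorem count_equal_sum_intervals_spec : Claim_equal_count_equal_sum_intervals := by
  intro N A B _ _
  show count_equal_sum_intervals N A B = count_equal_sum_intervals_alt N A B
  unfold count_equal_sum_intervals count_equal_sum_intervals_alt
  have hb : pvBuildC_alt N A B = pvBuildC N A B := rfl
  rw [hb]
  cases pvBuildC N A B with
  | none => rfl
  | some C => exact pv_loops_agree C
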